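-- pv_equiv track=rewrite | github.com/PratikKin/Statistics-Case-Study-Group-12 | Case Study Coding/Unit III/runs-test.py | subtract_median_and_get_sign
-- ===== SOURCE A (Python) =====
-- def subtract_median_and_get_sign(data, median): # Calculate the median
--     signs = []
--     positive_count = 0
--     negative_count = 0
--
--     for value in data:
--         difference = value - median
--         if difference > 0:
--             signs.append('+')
--             positive_count += 1
--         elif difference < 0:
--             signs.append('-')
--             negative_count += 1
--         else:
--             signs.append('0')
--
--     sign_cal = min(positive_count, negative_count)
--     calculated_sample_size = abs(positive_count + negative_count)
--     return sign_cal, calculated_sample_size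
-- ===== SOURCE B (Python) =====
-- def _partition_point(s, pred):
--     # first index i with pred(s[i]) false; s must be partitioned w.r.t. pred
--     lo, hi = 0, len(s)
--     while lo < hi:
--         mid = (lo + hi) // 2
--         if pred(s[mid]):
--             lo = mid + 1
--         else:
--             hi = mid
--     return lo
--
-- def subtract_median_and_get_sign(data, median):
--     s = sorted(data)
--     n = len(s)
--     negative_count = _partition_point(s, lambda v: v < median)
--     positive_count = n - _partition_point(s, lambda v: v <= median)
--     return min(positive_count, negative_count), positive_count + negative_count
-- ===== Notes on version B (the rewrite author's own statement) =====
-- stated objective: alternative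
-- what changed: Replaces A's single branching scan (with an unused signs list) by sort-then-binary-search: sort the data and locate the below-median and above-median block sizes with two hand-written partition-point binary searches.
import Mathlib
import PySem

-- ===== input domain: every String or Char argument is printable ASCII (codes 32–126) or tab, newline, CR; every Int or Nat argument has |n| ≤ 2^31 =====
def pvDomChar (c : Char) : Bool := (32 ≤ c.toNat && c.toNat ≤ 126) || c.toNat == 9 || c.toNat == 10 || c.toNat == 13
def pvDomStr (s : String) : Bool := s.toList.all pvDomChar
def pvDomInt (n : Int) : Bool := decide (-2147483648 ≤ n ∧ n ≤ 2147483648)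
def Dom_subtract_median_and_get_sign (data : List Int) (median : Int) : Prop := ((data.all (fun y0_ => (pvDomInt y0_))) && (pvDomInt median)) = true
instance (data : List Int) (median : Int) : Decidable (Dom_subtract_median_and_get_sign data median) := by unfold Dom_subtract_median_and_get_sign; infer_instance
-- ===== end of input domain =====

-- B replaces A's single branching scan (with an unused signs list) by sort + two
-- hand-written partition-point binary searches; objective: alternative (not faster).

-- ===== PORT A =====
-- one fold carrying (signs, positive_count, negative_count), exactly A's loop
def subtract_median_and_get_sign (data : List Int) (median : Int) : Int × Int :=
  let st := data.foldl (fun (st : List String × Int × Int) value =>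
    let (signs, positive_count, negative_count) := st
    let difference := value - median
    if difference > 0 then (signs ++ ["+"], positive_count + 1, negative_count)
    else if difference < 0 then (signs ++ ["-"], positive_count, negative_count + 1)
    else (signs ++ ["0"], positive_count, negative_count)) ([], 0, 0)
  let sign_cal := min st.2.1 st.2.2
  let calculated_sample_size := |st.2.1 + st.2.2|
  (sign_cal, calculated_sample_size)

-- ===== PORT B =====
-- _partition_point: the while-loop binary search of Source B; the index mid is always
-- in range (0 ≤ lo ≤ mid < hi ≤ len s), so Python's s[mid] never raises and
-- getD mid 0 is exact there.
def pvPartitionPoint (s : List Int) (pred : Int → Bool) (lo hi : Nat) : Nat :=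
  if _h : lo < hi then
    let mid := (lo + hi) / 2
    if pred (s.getD mid 0) then pvPartitionPoint s pred (mid + 1) hi
    else pvPartitionPoint s pred lo mid
  else lo
termination_by hi - lo
decreasing_by all_goals omega

def subtract_median_and_get_sign_alt (data : List Int) (median : Int) : Int × Int :=
  let s := PySem.List.sorted data (fun x => x) false
  let n := s.length
  let negative_count : Int := (pvPartitionPoint s (fun v => decide (v < median)) 0 n : Int)
  let positive_count : Int := (n : Int) - (pvPartitionPoint s (fun v => decide (v ≤ median)) 0 n : Int)
  (min positive_count negative_count, positive_count + negative_count)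

-- ===== PRECONDITION & SPEC =====
def Spec_subtract_median_and_get_sign (data : List Int) (median : Int) (out : Int × Int) : Prop := out = subtract_median_and_get_sign_alt data median
instance (data : List Int) (median : Int) (out : Int × Int) : Decidable (Spec_subtract_median_and_get_sign data median out) := by unfold Spec_subtract_median_and_get_sign; infer_instance

-- ===== CLAIM (what is proved, stated in full; the proofs are below) =====
def Claim_equal_subtract_median_and_get_sign : Prop := ∀ (data : List Int) (median : Int), Dom_subtract_median_and_get_sign data median → Spec_subtract_median_and_get_sign data median (subtract_median_and_get_sign data median)

-- ===== LEMMAS AND PROOFS =====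

-- A's fold adds the two filtered counts to the accumulator
theorem pvFold_counts (data : List Int) (median : Int) (s : List String) (p n : Int) :
    (data.foldl (fun (st : List String × Int × Int) value =>
      let (signs, positive_count, negative_count) := st
      let difference := value - median
      if difference > 0 then (signs ++ ["+"], positive_count + 1, negative_count)
      else if difference < 0 then (signs ++ ["-"], positive_count, negative_count + 1)
      else (signs ++ ["0"], positive_count, negative_count)) (s, p, n)).2 =
    (p + (data.countP (fun v => decide (median < v)) : Int),
     n + (data.countP (fun v => decide (v < median)) : Int)) := by
  induction data generalizing s p n with
  | nil => simp
  | cons x xs ih =>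
    simp only [List.foldl_cons, List.countP_cons]
    by_cases h1 : x - median > 0
    · have hx : median < x := by omega
      have hx2 : ¬ (x < median) := by omega
      simp only [if_pos h1, ih, hx, hx2, decide_true, decide_false]
      simp only [Prod.mk.injEq]
      push_cast
      constructor <;> omega
    · by_cases h2 : x - median < 0
      · have hx : x < median := by omega
        have hx2 : ¬ (median < x) := by omega
        simp only [if_neg h1, if_pos h2, ih, hx, hx2, decide_true, decide_false]
        simp only [Prod.mk.injEq]
        push_cast
        constructor <;> omega
      · have hx : ¬ (median < x) := by omega
        have hx2 : ¬ (x < median) := by omega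
        simp only [if_neg h1, if_neg h2, ih, hx, hx2, decide_false]
        simp

-- on a sorted list, a value-downward-closed predicate holds exactly on the prefix
-- of length countP
theorem pvSorted_prefix_iff (s : List Int) (p : Int → Bool)
    (hs : s.Pairwise (· ≤ ·)) (hmono : ∀ x y : Int, x ≤ y → p y = true → p x = true) :
    ∀ i, i < s.length → (p (s.getD i 0) = true ↔ i < s.countP p) := by
  induction s with
  | nil => intro i hi; simp at hi
  | cons x xs ih =>
    intro i hi
    have hx_le : ∀ y ∈ xs, x ≤ y := fun y hy => (List.pairwise_cons.mp hs).1 y hy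
    have htail := (List.pairwise_cons.mp hs).2
    by_cases hpx : p x = true
    · cases i with
      | zero => simp [hpx]
      | succ j =>
        have hj : j < xs.length := by simpa using hi
        have hIH := ih htail j hj
        simp only [List.getD_cons_succ, List.countP_cons, hpx, if_true]
        rw [hIH]
        omega
    · -- no element of xs satisfies p: x ≤ y and p y would give p x
      have hzero : xs.countP p = 0 := by
        rw [List.countP_eq_zero]
        intro y hy hpy
        exact hpx (hmono x y (hx_le y hy) hpy)
      cases i with
      | zero => simp [hpx, hzero]
      | succ j =>
        have hj : j < xs.length := by simpa using hi
        have hmem : xs.getD j 0 ∈ xs := by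
          rw [List.getD_eq_getElem _ _ hj]; exact List.getElem_mem hj
        have hnp : ¬ p (xs.getD j 0) = true := fun h => hpx (hmono x _ (hx_le _ hmem) h)
        have hc : List.countP p (x :: xs) = 0 := by simp [hpx, hzero]
        rw [List.getD_cons_succ, hc]
        exact iff_of_false hnp (by omega)

-- the binary-search loop finds the partition point countP p
theorem pvPartitionPoint_eq (s : List Int) (p : Int → Bool)
    (hA : ∀ i, i < s.countP p → p (s.getD i 0) = true)
    (hB : ∀ i, s.countP p ≤ i → i < s.length → ¬ p (s.getD i 0) = true) :
    ∀ k lo hi, hi - lo ≤ k → lo ≤ s.countP p → s.countP p ≤ hi → hi ≤ s.length →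
      pvPartitionPoint s p lo hi = s.countP p := by
  intro k
  induction k with
  | zero =>
    intro lo hi hk h1 h2 h3
    rw [pvPartitionPoint]
    have : ¬ lo < hi := by omega
    simp only [this, dif_neg, not_false_iff]
    omega
  | succ m ih =>
    intro lo hi hk h1 h2 h3
    rw [pvPartitionPoint]
    by_cases hlt : lo < hi
    · simp only [dif_pos hlt]
      set mid := (lo + hi) / 2 with hmid
      have hmlo : lo ≤ mid := by omega
      have hmhi : mid < hi := by omega
      by_cases hp : p (s.getD mid 0) = true
      · have hcm : mid < s.countP p := by
          by_contra hc
          exact hB mid (by omega) (by omega) hp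
        simp only [hp, if_true]
        exact ih (mid + 1) hi (by omega) (by omega) h2 h3
      · have hcm : s.countP p ≤ mid := by
          by_contra hc
          exact hp (hA mid (by omega))
        simp only [hp]
        exact ih lo mid (by omega) h1 (by omega) (by omega)
    · simp only [dif_neg hlt]
      omega

theorem pvCount_split (data : List Int) (median : Int) :
    data.countP (fun v => decide (v ≤ median)) + data.countP (fun v => decide (median < v))
      = data.length := by
  induction data with
  | nil => simp
  | cons x xs ih =>
    simp only [List.countP_cons, List.length_cons]
    by_cases h : x ≤ median
    · have h2 : ¬ (median < x) := by omega
      simp [h, h2]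
      omega
    · have h2 : median < x := by omega
      simp [h, h2]
      omega

-- ===== VERDICT (by name: the statement is the Claim_ definition above) =====
theorem subtract_median_and_get_sign_spec : Claim_equal_subtract_median_and_get_sign := by
  intro data median _
  show _ = _
  unfold subtract_median_and_get_sign subtract_median_and_get_sign_alt
  simp only [pvFold_counts, Int.zero_add]
  set s := PySem.List.sorted data (fun x => x) false with hsdef
  have hperm : s.Perm data := PySem.List.sorted_perm data (fun x => x) false
  have hsorted : s.Pairwise (· ≤ ·) := by
    simpa using PySem.List.sorted_pairwise data (fun x => x)
  have hlen : s.length = data.length := hperm.length_eq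
  -- the two partition points
  have hlt : pvPartitionPoint s (fun v => decide (v < median)) 0 s.length
      = s.countP (fun v => decide (v < median)) := by
    have hm : ∀ x y : Int, x ≤ y → decide (y < median) = true → decide (x < median) = true := by
      intro x y hxy h; simp at h ⊢; omega
    have hiff := pvSorted_prefix_iff s _ hsorted hm
    refine pvPartitionPoint_eq s _ ?_ ?_ s.length 0 s.length (by omega)
      (Nat.zero_le _) List.countP_le_length le_rfl
    · intro i hi
      exact (hiff i (lt_of_lt_of_le hi List.countP_le_length)).mpr hi
    · intro i h1 h2 h3
      exact absurd ((hiff i h2).mp h3) (by omega)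
  have hle : pvPartitionPoint s (fun v => decide (v ≤ median)) 0 s.length
      = s.countP (fun v => decide (v ≤ median)) := by
    have hm : ∀ x y : Int, x ≤ y → decide (y ≤ median) = true → decide (x ≤ median) = true := by
      intro x y hxy h; simp at h ⊢; omega
    have hiff := pvSorted_prefix_iff s _ hsorted hm
    refine pvPartitionPoint_eq s _ ?_ ?_ s.length 0 s.length (by omega)
      (Nat.zero_le _) List.countP_le_length le_rfl
    · intro i hi
      exact (hiff i (lt_of_lt_of_le hi List.countP_le_length)).mpr hi
    · intro i h1 h2 h3
      exact absurd ((hiff i h2).mp h3) (by omega)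
  -- counts transfer along the permutation
  have hclt : s.countP (fun v => decide (v < median)) = data.countP (fun v => decide (v < median)) :=
    hperm.countP_eq _
  have hcle : s.countP (fun v => decide (v ≤ median)) = data.countP (fun v => decide (v ≤ median)) :=
    hperm.countP_eq _
  have hsum := pvCount_split data median
  have hQ : ((data.length : Int) - (data.countP (fun v => decide (v ≤ median)) : Int))
      = (data.countP (fun v => decide (median < v)) : Int) := by omega
  rw [hlt, hle, hclt, hcle, hlen, hQ]
  rw [abs_of_nonneg (by omega :
    (0:Int) ≤ (data.countP (fun v => decide (median < v)) : Int)
      + (data.countP (fun v => decide (v < median)) : Int))]
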